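-- pv_equiv track=rewrite | github.com/etaba/import_itunes_to_spotify | import_itunes.py | remove_feat
-- ===== SOURCE A (Python) =====
-- def remove_feat(str):
--     str = str.lower()
--     synonyms = [' ft', ' feat']
--     for synonym in synonyms:
--         if synonym not in str:
--             continue
--         str = str[:str.find(synonym)]
--     return str
-- ===== SOURCE B (Python) =====
-- def remove_feat(str):
--     s = str.lower()
--     cuts = [i for i in (s.find(' ft'), s.find(' feat')) if i != -1]
--     return s[:min(cuts)] if cuts else s
-- ===== Notes on version B (the rewrite author's own statement) =====
-- stated objective: simpler
-- what changed: A truncates twice in sequence (first at ' ft', then at ' feat' in the already-truncated string); B computes both first-occurrence positions once and slices a single time at their minimum, relying on the fact that the two markers' occurrences cannot overlap.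
import Mathlib
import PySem

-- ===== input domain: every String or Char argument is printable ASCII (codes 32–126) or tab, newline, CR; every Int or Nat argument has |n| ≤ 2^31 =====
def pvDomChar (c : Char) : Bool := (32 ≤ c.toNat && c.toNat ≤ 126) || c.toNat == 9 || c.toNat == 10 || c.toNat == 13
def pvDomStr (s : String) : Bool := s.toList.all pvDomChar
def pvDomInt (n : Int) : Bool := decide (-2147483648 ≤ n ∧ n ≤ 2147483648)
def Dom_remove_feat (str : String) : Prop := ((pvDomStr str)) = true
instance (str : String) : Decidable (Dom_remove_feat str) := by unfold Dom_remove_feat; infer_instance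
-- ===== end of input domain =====

set_option maxHeartbeats 1000000


-- B replaces A's two sequential conditional truncations by a single slice at the minimum
-- of the first-occurrence positions of ' ft' and ' feat' (objective: simpler).

-- ===== PORT A =====
-- literal transliteration of A: lowercase, then a for-loop over the two synonyms,
-- each step truncating at str.find(synonym) when the synonym occurs ('continue' = keep s).
def remove_feat (str : String) : String :=
  [" ft", " feat"].foldl
    (fun s syn =>
      if PySem.Str.isIn syn s = false then s
      else PySem.Str.slice s none (some (PySem.Str.find s syn)))
    (PySem.Str.lower str)

-- ===== PORT B =====
-- literal transliteration of Source B: collect the find results that are not -1, slice at their min.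
def remove_feat_alt (str : String) : String :=
  let s := PySem.Str.lower str
  let cuts := ([PySem.Str.find s " ft", PySem.Str.find s " feat"]).filter (fun i => !(i == -1))
  match PySem.List.min? cuts (fun i => i) with
  | some c => PySem.Str.slice s none (some c)
  | none => s

-- ===== PRECONDITION & SPEC =====
def Spec_remove_feat (str : String) (out : String) : Prop := out = remove_feat_alt str
instance (str : String) (out : String) : Decidable (Spec_remove_feat str out) := by unfold Spec_remove_feat; infer_instance

-- ===== CLAIM (what is proved, stated in full; the proofs are below) =====
def Claim_equal_remove_feat : Prop := ∀ (str : String), Dom_remove_feat str → Spec_remove_feat str (remove_feat str)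

-- ===== LEMMAS AND PROOFS =====

-- a pattern absent from L is absent from any prefix of L
theorem pv_isIn_take_false {sub L : List Char} {n : Nat}
    (h : PySem.Chars.isIn sub L = false) : PySem.Chars.isIn sub (L.take n) = false := by
  rw [PySem.Chars.isIn_eq_false_iff] at h ⊢
  exact fun hin => h (hin.trans (L.take_prefix n).isInfix)

-- find characterised by its first occurrence
theorem pv_find_eq {pat L : List Char} {k : Nat}
    (hk : pat <+: L.drop k) (hmin : ∀ i < k, ¬ pat <+: L.drop i) :
    PySem.Chars.find L pat = (k : Int) := by
  have hin : PySem.Chars.isIn pat L = true :=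
    (PySem.Chars.exists_prefix_drop_iff_isIn pat L).mp ⟨k, hk⟩
  have hnn : 0 ≤ PySem.Chars.find L pat := by
    rw [PySem.Chars.find_nonneg_iff, ← PySem.Chars.isIn_iff_infix]; exact hin
  obtain ⟨hpre, hlt⟩ := PySem.Chars.find_spec hnn
  have h1 : (PySem.Chars.find L pat).toNat ≤ k := by
    by_contra h
    exact hlt k (by omega) hk
  have h2 : ¬ (PySem.Chars.find L pat).toNat < k := fun h => hmin _ h hpre
  omega

-- occurrences of ' ft' and ' feat' cannot start at the same index
theorem pv_ne_same {L : List Char} {k : Nat}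
    (hft : ([' ', 'f', 't'] : List Char) <+: L.drop k)
    (hfe : ([' ', 'f', 'e', 'a', 't'] : List Char) <+: L.drop k) : False := by
  obtain ⟨t, ht⟩ := hft
  obtain ⟨u, hu⟩ := hfe
  rw [← hu] at ht
  simp at ht

-- if ' feat' occurs at q and ' ft' occurs at p with q < p, the occurrences cannot overlap
theorem pv_no_overlap {L : List Char} {p q : Nat}
    (hft : ([' ', 'f', 't'] : List Char) <+: L.drop p)
    (hfe : ([' ', 'f', 'e', 'a', 't'] : List Char) <+: L.drop q)
    (hlt : q < p) : q + 5 ≤ p := by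
  by_contra hcon
  obtain ⟨t, ht⟩ := hfe
  obtain ⟨u, hu⟩ := hft
  have hsp : L[p]? = some ' ' := by
    have h0 : (List.drop p L)[0]? = L[p + 0]? := List.getElem?_drop
    rw [← hu] at h0; simpa using h0.symm
  have hc : L[q + (p - q)]? = ([' ', 'f', 'e', 'a', 't'] : List Char)[p - q]? := by
    have h0 : (List.drop q L)[p - q]? = L[q + (p - q)]? := List.getElem?_drop
    rw [← ht, List.getElem?_append_left (by simp; omega)] at h0
    exact h0.symm
  rw [show q + (p - q) = p by omega, hsp] at hc
  have h1 : 1 ≤ p - q := by omega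
  have h5 : p - q ≤ 4 := by omega
  interval_cases hpq : (p - q) <;> simp_all

-- occurrences inside a take are occurrences in the whole list
theorem pv_prefix_drop_take {pat L : List Char} {n i : Nat}
    (h : pat <+: (L.take n).drop i) : pat <+: L.drop i := by
  rw [List.drop_take] at h
  exact h.trans (List.take_prefix _ _)

-- Str.isIn via a computed toList of the pattern
theorem pv_isIn_str (t sub : String) (cs : List Char) (h : sub.toList = cs) :
    PySem.Str.isIn sub t = PySem.Chars.isIn cs t.toList := by simp [← h]

-- main equivalence on an arbitrary string
theorem pv_main (str : String) : remove_feat str = remove_feat_alt str := by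
  have hsub1 : (" ft" : String).toList = [' ', 'f', 't'] := by decide
  have hsub2 : (" feat" : String).toList = [' ', 'f', 'e', 'a', 't'] := by decide
  set s := PySem.Str.lower str with hs
  set L := s.toList with hL
  set P := PySem.Str.find s " ft" with hP
  set Q := PySem.Str.find s " feat" with hQ
  have hPc : P = PySem.Chars.find L [' ', 'f', 't'] := by rw [hP, hL]; simp [hsub1]
  have hQc : Q = PySem.Chars.find L [' ', 'f', 'e', 'a', 't'] := by rw [hQ, hL]; simp [hsub2]
  have hPlb : -1 ≤ P := hPc ▸ PySem.Chars.neg_one_le_find L _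
  have hQlb : -1 ≤ Q := hQc ▸ PySem.Chars.neg_one_le_find L _
  simp only [remove_feat, remove_feat_alt, List.foldl_cons, List.foldl_nil, ← hs, ← hP, ← hQ]
  rcases (by omega : P = -1 ∨ 0 ≤ P) with hPe | hPge
  all_goals rcases (by omega : Q = -1 ∨ 0 ≤ Q) with hQe | hQge
  · -- both markers absent: both sides return s
    have hb1 : PySem.Str.isIn " ft" s = false := by
      rw [pv_isIn_str _ _ _ hsub1, PySem.Chars.isIn_eq_false_iff,
        ← PySem.Chars.find_eq_neg_one_iff, ← hL, ← hPc]
      exact hPe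
    have hb2 : PySem.Str.isIn " feat" s = false := by
      rw [pv_isIn_str _ _ _ hsub2, PySem.Chars.isIn_eq_false_iff,
        ← PySem.Chars.find_eq_neg_one_iff, ← hL, ← hQc]
      exact hQe
    rw [if_pos hb1, if_pos hb2, hPe, hQe]
    simp [PySem.List.min?]
  · -- only ' feat' present
    have hb1 : PySem.Str.isIn " ft" s = false := by
      rw [pv_isIn_str _ _ _ hsub1, PySem.Chars.isIn_eq_false_iff,
        ← PySem.Chars.find_eq_neg_one_iff, ← hL, ← hPc]
      exact hPe
    have hb2 : PySem.Str.isIn " feat" s = true := by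
      rw [pv_isIn_str _ _ _ hsub2, PySem.Chars.isIn_iff_infix,
        ← PySem.Chars.find_nonneg_iff, ← hL, ← hQc]
      exact hQge
    have hQne : (Q == (-1 : Int)) = false := by simp; omega
    rw [if_pos hb1, if_neg (c := PySem.Str.isIn " feat" s = false) (by rw [hb2]; simp), hPe, ← hQ]
    simp only [PySem.List.min?, List.filter, hQne, Bool.not_false, Bool.not_true,
      beq_self_eq_true, List.foldl_cons, List.foldl_nil]
  · -- only ' ft' present: the truncation at P contains no ' feat' either
    have hb1 : PySem.Str.isIn " ft" s = true := by
      rw [pv_isIn_str _ _ _ hsub1, PySem.Chars.isIn_iff_infix,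
        ← PySem.Chars.find_nonneg_iff, ← hL, ← hPc]
      exact hPge
    have hs1 : (PySem.Str.slice s none (some P)).toList = L.take P.toNat := by
      simp [PySem.Str.toList_slice, PySem.List.slice_to _ hPge, hL]
    have hnofe : PySem.Chars.isIn [' ', 'f', 'e', 'a', 't'] L = false := by
      rw [PySem.Chars.isIn_eq_false_iff, ← PySem.Chars.find_eq_neg_one_iff, ← hQc]
      exact hQe
    have hb2 : PySem.Str.isIn " feat" (PySem.Str.slice s none (some P)) = false := by
      rw [pv_isIn_str _ _ _ hsub2, hs1]
      exact pv_isIn_take_false hnofe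
    have hPne : (P == (-1 : Int)) = false := by simp; omega
    rw [if_neg (c := PySem.Str.isIn " ft" s = false) (by rw [hb1]; simp), if_pos hb2, hQe]
    simp only [PySem.List.min?, List.filter, hPne, Bool.not_false, Bool.not_true,
      beq_self_eq_true, List.foldl_cons, List.foldl_nil]
  · -- both present
    have hb1 : PySem.Str.isIn " ft" s = true := by
      rw [pv_isIn_str _ _ _ hsub1, PySem.Chars.isIn_iff_infix,
        ← PySem.Chars.find_nonneg_iff, ← hL, ← hPc]
      exact hPge
    have hs1 : (PySem.Str.slice s none (some P)).toList = L.take P.toNat := by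
      simp [PySem.Str.toList_slice, PySem.List.slice_to _ hPge, hL]
    have hPne : (P == (-1 : Int)) = false := by simp; omega
    have hQne : (Q == (-1 : Int)) = false := by simp; omega
    obtain ⟨hftp, _hPmin⟩ := PySem.Chars.find_spec (s := L) (sub := [' ', 'f', 't'])
      (by rw [← hPc]; exact hPge)
    obtain ⟨hfeq, hQmin⟩ := PySem.Chars.find_spec (s := L) (sub := [' ', 'f', 'e', 'a', 't'])
      (by rw [← hQc]; exact hQge)
    rw [← hPc] at hftp
    rw [← hQc] at hfeq hQmin
    rw [if_neg (c := PySem.Str.isIn " ft" s = false) (by rw [hb1]; simp)]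
    rcases Nat.lt_trichotomy P.toNat Q.toNat with hlt | heq | hgt
    · -- first ' ft' strictly before first ' feat': the truncation removes every ' feat'
      have hno : PySem.Chars.isIn [' ', 'f', 'e', 'a', 't'] (L.take P.toNat) = false := by
        rw [PySem.Chars.isIn_eq_false_iff]
        intro hinf
        obtain ⟨j, hj⟩ := (PySem.Chars.exists_prefix_drop_iff_isIn [' ', 'f', 'e', 'a', 't']
          (L.take P.toNat)).mpr ((PySem.Chars.isIn_iff_infix _ _).mpr hinf)
        have hjlen : j + 5 ≤ P.toNat := by
          have := hj.length_le
          simp at this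
          omega
        exact hQmin j (by omega) (pv_prefix_drop_take hj)
      have hb2 : PySem.Str.isIn " feat" (PySem.Str.slice s none (some P)) = false := by
        rw [pv_isIn_str _ _ _ hsub2, hs1]
        exact hno
      have hQP : ¬ ((fun i => (i : Int)) Q < (fun i => (i : Int)) P) := by simp; omega
      rw [if_pos hb2]
      simp only [PySem.List.min?, List.filter, hPne, hQne, Bool.not_false, List.foldl_cons,
        List.foldl_nil, if_neg hQP]
    · -- the two first occurrences cannot coincide
      rw [← heq] at hfeq
      exact absurd hfeq (fun h => pv_ne_same hftp h)
    · -- first ' feat' strictly before first ' ft': both truncate to the same prefix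
      have hsep : Q.toNat + 5 ≤ P.toNat := pv_no_overlap hftp hfeq hgt
      have hocc : ([' ', 'f', 'e', 'a', 't'] : List Char) <+: (L.take P.toNat).drop Q.toNat := by
        rw [List.drop_take]
        exact List.prefix_take_iff.mpr ⟨hfeq, by simp; omega⟩
      have hb2 : PySem.Str.isIn " feat" (PySem.Str.slice s none (some P)) = true := by
        rw [pv_isIn_str _ _ _ hsub2, hs1]
        exact (PySem.Chars.exists_prefix_drop_iff_isIn _ _).mp ⟨Q.toNat, hocc⟩
      have hfind1 : PySem.Str.find (PySem.Str.slice s none (some P)) " feat" = Q := by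
        have h0 : PySem.Chars.find (L.take P.toNat) [' ', 'f', 'e', 'a', 't'] = (Q.toNat : Int) :=
          pv_find_eq hocc (fun i hi hp => hQmin i hi (pv_prefix_drop_take hp))
        simp only [PySem.Str.find_eq, hsub2, hs1, h0]
        omega
      have hQP : ((fun i => (i : Int)) Q < (fun i => (i : Int)) P) := by simp; omega
      rw [if_neg (c := PySem.Str.isIn " feat" (PySem.Str.slice s none (some P)) = false) (by rw [hb2]; simp), hfind1]
      simp only [PySem.List.min?, List.filter, hPne, hQne, Bool.not_false, List.foldl_cons,
        List.foldl_nil, if_pos hQP]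
      apply String.toList_inj.mp
      rw [PySem.Str.toList_slice]
      simp only [PySem.Chars.slice_eq_listSlice, PySem.List.slice_to _ hQge, hs1]
      rw [List.take_take]
      have hmin : min Q.toNat P.toNat = Q.toNat := by omega
      rw [hmin, PySem.Str.toList_slice]
      simp only [PySem.Chars.slice_eq_listSlice, PySem.List.slice_to _ hQge, hL]

-- ===== VERDICT (by name: the statement is the Claim_ definition above) =====
theorem remove_feat_spec : Claim_equal_remove_feat := by
  intro str _
  unfold Spec_remove_feat
  exact pv_main str
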